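-- pv_equiv track=rewrite | github.com/raghav-ambitus/env-sample | backend/generate_puzzle.py | corner_connected_components
-- ===== SOURCE A (Python) =====
-- def corner_neighbors(cell):
--     x,y = cell
--     return [(x-1,y-1),(x-1,y+1),(x+1,y-1),(x+1,y+1)]
--
-- def corner_connected_components(placed_sets):
--     n = len(placed_sets)
--     adj = [[] for _ in range(n)]
--     for i in range(n):
--         for j in range(i+1,n):
--             connected = False
--             for a in placed_sets[i]:
--                 for nbr in corner_neighbors(a):
--                     if nbr in placed_sets[j]:
--                         connected=True; break
--                 if connected: break
--             if connected:
--                 adj[i].append(j); adj[j].append(i)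
--     visited=[False]*n; comps=[]
--     for i in range(n):
--         if visited[i]: continue
--         q=[i]; comp=set([i]); visited[i]=True
--         while q:
--             u=q.pop()
--             for v in adj[u]:
--                 if not visited[v]:
--                     visited[v]=True; q.append(v); comp.add(v)
--         comps.append(comp)
--     return comps
-- ===== SOURCE B (Python) =====
-- def corner_connected_components(placed_sets):
--     n = len(placed_sets)
--     # index every cell: cell -> list of set indices that contain it
--     owners = {}
--     for idx, cells in enumerate(placed_sets):
--         for c in cells:
--             owners.setdefault(c, []).append(idx)
--     # one scan over all cells' corner neighbors builds the neighbor sets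
--     nbr_sets = [set() for _ in range(n)]
--     for idx, cells in enumerate(placed_sets):
--         for (x, y) in cells:
--             for c in ((x-1,y-1),(x-1,y+1),(x+1,y-1),(x+1,y+1)):
--                 for j in owners.get(c, []):
--                     if j != idx:
--                         nbr_sets[idx].add(j)
--     adj = [sorted(nbr_sets[u]) for u in range(n)]
--     # depth-first collection of the components
--     visited = [False]*n
--     comps = []
--     for i in range(n):
--         if visited[i]:
--             continue
--         q = [i]; comp = set([i]); visited[i] = True
--         while q:
--             u = q.pop()
--             for v in adj[u]:
--                 if not visited[v]:
--                     visited[v] = True; q.append(v); comp.add(v)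
--         comps.append(comp)
--     return comps
-- ===== Notes on version B (the rewrite author's own statement) =====
-- stated objective: faster
-- what changed: B replaces A's O(n^2) pairwise comparisons (each scanning all cells of both sets) by a cell->owning-set-indices dict built once, from which one scan over every cell's four corner neighbors yields each set's sorted neighbor list; the component collection is the same DFS, so the result is identical.
import Mathlib
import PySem

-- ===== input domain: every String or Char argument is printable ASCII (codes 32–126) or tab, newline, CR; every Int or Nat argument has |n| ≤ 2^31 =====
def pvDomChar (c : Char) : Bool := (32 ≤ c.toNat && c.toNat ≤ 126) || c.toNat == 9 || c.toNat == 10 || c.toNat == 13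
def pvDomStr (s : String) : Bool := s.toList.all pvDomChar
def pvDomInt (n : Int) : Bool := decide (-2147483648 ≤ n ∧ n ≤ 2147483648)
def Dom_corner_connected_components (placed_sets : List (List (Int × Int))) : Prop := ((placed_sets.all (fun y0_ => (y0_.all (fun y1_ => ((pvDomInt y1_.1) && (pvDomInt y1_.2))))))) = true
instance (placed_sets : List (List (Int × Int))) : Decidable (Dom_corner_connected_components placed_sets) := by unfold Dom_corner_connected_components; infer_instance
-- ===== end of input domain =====

-- B replaces A's O(n^2) pairwise all-cells scans by a cell->owners index scanned once per corner
-- neighbor of each cell (objective: faster); the component traversal itself is the same DFS, so the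
-- returned value is identical.  Arrays indexed by vertex are modelled as total maps Int → _.

-- ===== PORT A =====
def corner_neighbors (cell : Int × Int) : List (Int × Int) :=
  [(cell.1 - 1, cell.2 - 1), (cell.1 - 1, cell.2 + 1), (cell.1 + 1, cell.2 - 1), (cell.1 + 1, cell.2 + 1)]

-- placed_sets[i] (loop indices are always in range, so the default [] is never taken)
def pvGetSet (ps : List (List (Int × Int))) (i : Int) : List (Int × Int) :=
  (PySem.List.pyGet? ps i).getD []

-- A's break-out triple loop computing `connected` for the pair (i, j) (break = short-circuit any)
def pvConnected (si sj : List (Int × Int)) : Bool :=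
  si.any (fun a => (corner_neighbors a).any (fun nbr => sj.contains nbr))

-- adj[i].append(j); adj[j].append(i)
def pvPairUpd (i j : Int) (adj : Int → List Int) : Int → List Int :=
  fun u => if u = i then adj u ++ [j] else if u = j then adj u ++ [i] else adj u

def pvInnerA (ps : List (List (Int × Int))) (i : Int) (adj : Int → List Int) (j : Int) : Int → List Int :=
  if pvConnected (pvGetSet ps i) (pvGetSet ps j) then pvPairUpd i j adj else adj

def pvRowA (ps : List (List (Int × Int))) (adj : Int → List Int) (i : Int) : Int → List Int :=
  (PySem.List.pyRange (i + 1) (ps.length : Int) 1).foldl (pvInnerA ps i) adj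

def pvAdjA (ps : List (List (Int × Int))) : Int → List Int :=
  (PySem.List.pyRange 0 (ps.length : Int) 1).foldl (pvRowA ps) (fun _ => [])

-- the body of `for v in adj[u]` inside the while loop (state q, visited, comp)
def pvScan (st : List Int × (Int → Bool) × PySem.Set Int) (v : Int) :
    List Int × (Int → Bool) × PySem.Set Int :=
  if st.2.1 v then st
  else (st.1 ++ [v], fun w => if w = v then true else st.2.1 w, st.2.2.add v)

-- `while q:` — fuel n suffices: each iteration pops one element and every element ever
-- pushed is a freshly visited vertex, so at most n pops happen before q is empty
def pvWhile (adj : Int → List Int) : Nat → List Int → (Int → Bool) → PySem.Set Int →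
    ((Int → Bool) × PySem.Set Int)
  | 0, _, vis, comp => (vis, comp)
  | fuel + 1, q, vis, comp =>
    match q.getLast? with
    | none => (vis, comp)
    | some u =>
      let st := (adj u).foldl pvScan (q.dropLast, vis, comp)
      pvWhile adj fuel st.1 st.2.1 st.2.2

-- the visited/comps loop, shared verbatim by both programs
def pvComps (adj : Int → List Int) (n : Int) : List (List Int) :=
  ((PySem.List.pyRange 0 n 1).foldl (fun st i =>
      if st.1 i then st
      else
        let vis : Int → Bool := fun w => if w = i then true else st.1 w
        let r := pvWhile adj n.toNat [i] vis (PySem.Set.ofList [i])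
        (r.1, st.2 ++ [r.2]))
    ((fun _ => false), [])).2

def corner_connected_components (placed_sets : List (List (Int × Int))) : List (List Int) :=
  pvComps (pvAdjA placed_sets) (placed_sets.length : Int)

-- ===== PORT B =====
-- B's inline corner-neighbor tuple
def pvCorners4 (a : Int × Int) : List (Int × Int) :=
  [(a.1 - 1, a.2 - 1), (a.1 - 1, a.2 + 1), (a.1 + 1, a.2 - 1), (a.1 + 1, a.2 + 1)]

-- owners.setdefault(c, []).append(idx)
def pvOwners (ps : List (List (Int × Int))) : PySem.Dict (Int × Int) (List Int) :=
  (PySem.List.enumerate ps).foldl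
    (fun d p => p.2.foldl (fun d c => d.modify c [] (· ++ [p.1])) d)
    PySem.Dict.empty

-- nbr_sets[idx].add(j)
def pvAddNbr (idx : Int) (ns : Int → PySem.Set Int) (j : Int) : Int → PySem.Set Int :=
  if j ≠ idx then (fun u => if u = idx then (ns u).add j else ns u) else ns

def pvNbrSets (ps : List (List (Int × Int))) : Int → PySem.Set Int :=
  (PySem.List.enumerate ps).foldl
    (fun ns p =>
      p.2.foldl (fun ns a =>
        (pvCorners4 a).foldl (fun ns c =>
          ((pvOwners ps).getD c []).foldl (pvAddNbr p.1) ns) ns) ns)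
    (fun _ => PySem.Set.empty)

def corner_connected_components_alt (placed_sets : List (List (Int × Int))) : List (List Int) :=
  pvComps (fun u => PySem.List.sorted (pvNbrSets placed_sets u) (fun x => x) false)
    (placed_sets.length : Int)

-- ===== PRECONDITION & SPEC =====
def Spec_corner_connected_components (placed_sets : List (List (Int × Int))) (out : List (List Int)) : Prop := out = corner_connected_components_alt placed_sets
instance (placed_sets : List (List (Int × Int))) (out : List (List Int)) : Decidable (Spec_corner_connected_components placed_sets out) := by unfold Spec_corner_connected_components; infer_instance

-- ===== CLAIM (what is proved, stated in full; the proofs are below) =====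
def Claim_equal_corner_connected_components : Prop := ∀ (placed_sets : List (List (Int × Int))), Dom_corner_connected_components placed_sets → Spec_corner_connected_components placed_sets (corner_connected_components placed_sets)

-- ===== LEMMAS AND PROOFS =====

lemma mem_corners_symm (a b : Int × Int) : b ∈ corner_neighbors a ↔ a ∈ corner_neighbors b := by
  obtain ⟨x, y⟩ := a; obtain ⟨u, v⟩ := b
  simp [corner_neighbors, Prod.ext_iff]
  omega

lemma pvConnected_iff (s t : List (Int × Int)) :
    pvConnected s t = true ↔ ∃ a ∈ s, ∃ c ∈ corner_neighbors a, c ∈ t := by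
  simp [pvConnected]

lemma pvConnected_symm (s t : List (Int × Int)) : pvConnected s t = pvConnected t s := by
  have H : ∀ s t : List (Int × Int), pvConnected s t = true → pvConnected t s = true := by
    intro s t h
    simp only [pvConnected, List.any_eq_true, List.contains_iff_mem] at h ⊢
    obtain ⟨a, ha, c, hc, hct⟩ := h
    exact ⟨c, hct, a, (mem_corners_symm a c).mp hc, ha⟩
  cases hst : pvConnected s t <;> cases hts : pvConnected t s <;> simp_all [H s t, H t s]

-- what row i contributes to adj[u]
def pvExtra (ps : List (List (Int × Int))) (i u : Int) : List Int :=
  if u = i then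
    (PySem.List.pyRange (i + 1) (ps.length : Int) 1).filter
      (fun j => pvConnected (pvGetSet ps i) (pvGetSet ps j))
  else if (i < u ∧ u < (ps.length : Int)) ∧ pvConnected (pvGetSet ps i) (pvGetSet ps u) = true then [i]
  else []

lemma innerA_foldl (ps : List (List (Int × Int))) (i : Int) (L : List Int) (hL : L.Nodup)
    (hi : i ∉ L) (adj : Int → List Int) (u : Int) :
    (L.foldl (pvInnerA ps i) adj) u = adj u ++
      (if u = i then L.filter (fun j => pvConnected (pvGetSet ps i) (pvGetSet ps j))
       else if u ∈ L ∧ pvConnected (pvGetSet ps i) (pvGetSet ps u) = true then [i] else []) := by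
  induction L generalizing adj with
  | nil => simp
  | cons j L ih =>
    obtain ⟨hjL, hL⟩ := List.nodup_cons.mp hL
    have hij : i ≠ j := fun h => hi (h ▸ List.mem_cons_self)
    have hiL : i ∉ L := fun h => hi (List.mem_cons_of_mem _ h)
    rw [List.foldl_cons, ih hL hiL]
    by_cases hui : u = i
    · subst hui
      by_cases hc : pvConnected (pvGetSet ps u) (pvGetSet ps j) = true
      · simp [pvInnerA, pvPairUpd, hc]
      · simp only [Bool.not_eq_true] at hc
        simp [pvInnerA, hc]
    · by_cases huj : u = j
      · subst huj
        by_cases hc : pvConnected (pvGetSet ps i) (pvGetSet ps u) = true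
        · simp [pvInnerA, pvPairUpd, hc, hui, hjL]
        · simp only [Bool.not_eq_true] at hc
          simp [pvInnerA, hc, hui, hjL]
      · have : pvInnerA ps i adj j u = adj u := by
          unfold pvInnerA pvPairUpd
          split <;> simp [hui, huj]
        rw [this]
        simp [hui, huj]

lemma rowA_eq (ps : List (List (Int × Int))) (adj : Int → List Int) (i u : Int) :
    pvRowA ps adj i u = adj u ++ pvExtra ps i u := by
  have hnd := PySem.List.nodup_pyRange_one (i + 1) (ps.length : Int)
  have hi : i ∉ PySem.List.pyRange (i + 1) (ps.length : Int) 1 := by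
    intro h
    have := (PySem.List.mem_pyRange_one).mp h
    omega
  rw [pvRowA, innerA_foldl ps i _ hnd hi adj u, pvExtra]
  congr 1
  by_cases hui : u = i
  · simp [hui]
  · simp only [hui, if_false]
    by_cases hm : u ∈ PySem.List.pyRange (i + 1) (ps.length : Int) 1
    · have := (PySem.List.mem_pyRange_one).mp hm
      simp [hm, show i < u ∧ u < (ps.length : Int) by omega]
    · have h2 : ¬ (i < u ∧ u < (ps.length : Int)) := by
        intro h
        exact hm (PySem.List.mem_pyRange_one.mpr (by omega))
      simp [hm, h2]

lemma foldl_rowA (ps : List (List (Int × Int))) (I : List Int) (adj : Int → List Int) (u : Int) :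
    (I.foldl (pvRowA ps) adj) u = adj u ++ I.flatMap (fun i => pvExtra ps i u) := by
  induction I generalizing adj with
  | nil => simp
  | cons i I ih => simp [List.foldl_cons, ih, rowA_eq, List.append_assoc]

lemma flatMap_ite_singleton (l : List Int) (p : Int → Bool) :
    l.flatMap (fun i => if p i = true then [i] else []) = l.filter p := by
  induction l with
  | nil => rfl
  | cons a l ih =>
    simp only [List.flatMap_cons, List.filter_cons, ih]
    split <;> simp

lemma adjA_in_range (ps : List (List (Int × Int))) (u : Int) (h0 : 0 ≤ u)
    (hn : u < (ps.length : Int)) :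
    pvAdjA ps u = (PySem.List.pyRange 0 (ps.length : Int) 1).filter
      (fun j => decide (j ≠ u) && pvConnected (pvGetSet ps u) (pvGetSet ps j)) := by
  have hsplit : PySem.List.pyRange 0 (ps.length : Int) 1 =
      PySem.List.pyRange 0 u 1 ++ [u] ++ PySem.List.pyRange (u + 1) (ps.length : Int) 1 := by
    rw [PySem.List.pyRange_one_append 0 u (ps.length : Int) h0 (le_of_lt hn),
        PySem.List.pyRange_one_cons hn]
    simp
  have hA : (PySem.List.pyRange 0 u 1).flatMap (fun i => pvExtra ps i u) =
      (PySem.List.pyRange 0 u 1).filter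
        (fun j => decide (j ≠ u) && pvConnected (pvGetSet ps u) (pvGetSet ps j)) := by
    have h1 : (PySem.List.pyRange 0 u 1).flatMap (fun i => pvExtra ps i u) =
        (PySem.List.pyRange 0 u 1).flatMap
          (fun i => if pvConnected (pvGetSet ps u) (pvGetSet ps i) = true then [i] else []) := by
      apply List.flatMap_congr
      intro i hi
      have hir := (PySem.List.mem_pyRange_one).mp hi
      have hui : u ≠ i := by omega
      rw [pvExtra, if_neg (by omega : ¬ u = i), pvConnected_symm]
      simp [show i < u ∧ u < (ps.length : Int) by omega]
    rw [h1, flatMap_ite_singleton]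
    apply List.filter_congr
    intro j hj
    have hjr := (PySem.List.mem_pyRange_one).mp hj
    simp [show j ≠ u by omega]
  have hu : pvExtra ps u u = (PySem.List.pyRange (u + 1) (ps.length : Int) 1).filter
      (fun j => decide (j ≠ u) && pvConnected (pvGetSet ps u) (pvGetSet ps j)) := by
    rw [pvExtra, if_pos rfl]
    apply List.filter_congr
    intro j hj
    have hjr := (PySem.List.mem_pyRange_one).mp hj
    simp [show j ≠ u by omega]
  have hC : (PySem.List.pyRange (u + 1) (ps.length : Int) 1).flatMap (fun i => pvExtra ps i u) = [] := by
    apply List.flatMap_eq_nil_iff.mpr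
    intro i hi
    have hir := (PySem.List.mem_pyRange_one).mp hi
    rw [pvExtra, if_neg (by omega : ¬ u = i), if_neg]
    rintro ⟨⟨h3, h4⟩, -⟩; omega
  rw [pvAdjA, foldl_rowA, hsplit]
  simp only [List.flatMap_append, List.filter_append, List.nil_append, hA, hu, hC,
    List.append_nil, List.flatMap_cons, List.flatMap_nil, List.filter_cons]
  simp

lemma adjA_out_range (ps : List (List (Int × Int))) (u : Int)
    (h : ¬ (0 ≤ u ∧ u < (ps.length : Int))) : pvAdjA ps u = [] := by
  rw [pvAdjA, foldl_rowA]
  simp only [List.nil_append]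
  apply List.flatMap_eq_nil_iff.mpr
  intro i hi
  have hir := (PySem.List.mem_pyRange_one).mp hi
  have hui : u ≠ i := by omega
  have h2 : ¬ ((i < u ∧ u < (ps.length : Int)) ∧ pvConnected (pvGetSet ps i) (pvGetSet ps u) = true) := by
    rintro ⟨⟨h3, h4⟩, -⟩; omega
  simp [pvExtra, hui, h2]

lemma getD_owners (ps : List (List (Int × Int))) (c : Int × Int) :
    (pvOwners ps).getD c [] = (PySem.List.enumerate ps).flatMap
      (fun p => (p.2.filter (fun c' => c' == c)).map (fun _ => p.1)) := by
  suffices h : ∀ (E : List (Int × List (Int × Int))) (d : PySem.Dict (Int × Int) (List Int)),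
      ((E.foldl (fun d p => p.2.foldl (fun d c => d.modify c [] (· ++ [p.1])) d) d).getD c []) =
        d.getD c [] ++ E.flatMap (fun p => (p.2.filter (fun c' => c' == c)).map (fun _ => p.1)) by
    rw [pvOwners, h]
    simp [PySem.Dict.getD]
  intro E
  induction E with
  | nil => simp
  | cons p E ih =>
    intro d
    have hinner : ∀ d' : PySem.Dict (Int × Int) (List Int),
        (p.2.foldl (fun d c => d.modify c [] (· ++ [p.1])) d').getD c [] =
          d'.getD c [] ++ (p.2.filter (fun c' => c' == c)).map (fun _ => p.1) := by
      intro d'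
      have heq : p.2.foldl (fun d c => d.modify c [] (· ++ [p.1])) d' =
          (p.2.map (fun c => (c, p.1))).foldl (fun d q => d.modify q.1 [] (· ++ [q.2])) d' := by
        rw [List.foldl_map]
      rw [heq, PySem.Dict.getD_foldl_modify_append]
      simp [List.filter_map, Function.comp_def, List.map_map]
    rw [List.foldl_cons, ih, hinner, List.flatMap_cons, List.append_assoc]

lemma mem_owners (ps : List (List (Int × Int))) (c : Int × Int) (j : Int) :
    j ∈ (pvOwners ps).getD c [] ↔ 0 ≤ j ∧ j < (ps.length : Int) ∧ c ∈ pvGetSet ps j := by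
  rw [getD_owners]
  simp only [List.mem_flatMap, List.mem_map, List.mem_filter, PySem.List.mem_enumerate_iff]
  constructor
  · rintro ⟨p, ⟨k, hk, rfl⟩, ⟨c', ⟨hc', hcc⟩, rfl⟩⟩
    have : c' = c := by simpa using hcc
    subst this
    refine ⟨by positivity, by simp [hk], ?_⟩
    simp only [pvGetSet]
    rw [show ((0 : Int) + (k : Int)) = ((k : Nat) : Int) by ring, PySem.List.pyGet?_natCast]
    simpa [hk] using hc'
  · rintro ⟨h0, hn, hmem⟩
    obtain ⟨k, rfl⟩ : ∃ k : Nat, j = (k : Int) := ⟨j.toNat, by omega⟩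
    have hk : k < ps.length := by exact_mod_cast hn
    refine ⟨((0 : Int) + (k : Int), ps[k]), ⟨k, hk, rfl⟩, ⟨c, ⟨?_, by simp⟩, by ring⟩⟩
    simpa [pvGetSet, PySem.List.pyGet?_natCast, hk] using hmem

lemma addNbr_foldl (idx : Int) (L : List Int) (ns : Int → PySem.Set Int) (u : Int) :
    (L.foldl (pvAddNbr idx) ns) u =
      if u = idx then PySem.Set.update (ns u) (L.filter (fun j => decide (j ≠ idx))) else ns u := by
  induction L generalizing ns with
  | nil => simp [PySem.Set.update_nil]
  | cons j L ih =>
    rw [List.foldl_cons, ih, List.filter_cons]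
    by_cases hj : j = idx
    · simp [pvAddNbr, hj]
    · simp only [hj, decide_not, pvAddNbr, ne_eq, not_false_iff, if_pos, decide_true]
      by_cases hu : u = idx
      · simp [hu, PySem.Set.update_cons]
      · simp [hu]

lemma layer_foldl {β : Type} (idx : Int) (g : β → List Int)
    (step : (Int → PySem.Set Int) → β → (Int → PySem.Set Int))
    (hstep : ∀ ns b u, step ns b u = if u = idx then PySem.Set.update (ns u) (g b) else ns u)
    (M : List β) (ns : Int → PySem.Set Int) (u : Int) :
    (M.foldl step ns) u = if u = idx then PySem.Set.update (ns u) (M.flatMap g) else ns u := by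
  induction M generalizing ns with
  | nil => simp [PySem.Set.update_nil]
  | cons b M ih =>
    rw [List.foldl_cons, ih, List.flatMap_cons]
    by_cases hu : u = idx
    · simp [hu, hstep, PySem.Set.update_append]
    · simp [hu, hstep]

-- everything row p of the scan adds to nbr_sets[p.1]
def pvBigL (ps : List (List (Int × Int))) (p : Int × List (Int × Int)) : List Int :=
  p.2.flatMap (fun a => (pvCorners4 a).flatMap
    (fun c => ((pvOwners ps).getD c []).filter (fun j => decide (j ≠ p.1))))

lemma nbrSets_eq_ofList (ps : List (List (Int × Int))) (u : Int) :
    pvNbrSets ps u = PySem.Set.ofList ((PySem.List.enumerate ps).flatMap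
      (fun p => if p.1 = u then pvBigL ps p else [])) := by
  rw [pvNbrSets]
  suffices h : ∀ (E : List (Int × List (Int × Int))) (ns : Int → PySem.Set Int),
      (E.foldl (fun ns p =>
        p.2.foldl (fun ns a =>
          (pvCorners4 a).foldl (fun ns c =>
            ((pvOwners ps).getD c []).foldl (pvAddNbr p.1) ns) ns) ns) ns) u =
        PySem.Set.update (ns u) (E.flatMap (fun p => if p.1 = u then pvBigL ps p else [])) by
    rw [h]
    exact PySem.Set.update_nil_left _
  intro E
  induction E with
  | nil => simp [PySem.Set.update_nil]
  | cons p E ih =>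
    intro ns
    have hrow : ∀ (ns : Int → PySem.Set Int) (u : Int),
        (p.2.foldl (fun ns a =>
          (pvCorners4 a).foldl (fun ns c =>
            ((pvOwners ps).getD c []).foldl (pvAddNbr p.1) ns) ns) ns) u =
          if u = p.1 then PySem.Set.update (ns u) (pvBigL ps p) else ns u := by
      intro ns u
      exact layer_foldl p.1
        (fun a => (pvCorners4 a).flatMap
          (fun c => ((pvOwners ps).getD c []).filter (fun j => decide (j ≠ p.1))))
        (fun ns a => (pvCorners4 a).foldl
          (fun ns c => ((pvOwners ps).getD c []).foldl (pvAddNbr p.1) ns) ns)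
        (fun ns a u => layer_foldl p.1
          (fun c => ((pvOwners ps).getD c []).filter (fun j => decide (j ≠ p.1)))
          (fun ns c => ((pvOwners ps).getD c []).foldl (pvAddNbr p.1) ns)
          (fun ns c u => addNbr_foldl p.1 _ ns u) (pvCorners4 a) ns u)
        p.2 ns u
    rw [List.foldl_cons, ih, List.flatMap_cons, hrow]
    by_cases hu : u = p.1
    · simp [hu, PySem.Set.update_append]
    · have hu' : ¬ p.1 = u := fun h => hu h.symm
      simp [hu, hu']

lemma mem_nbrSets (ps : List (List (Int × Int))) (u j : Int) :
    j ∈ pvNbrSets ps u ↔ (0 ≤ u ∧ u < (ps.length : Int)) ∧ j ≠ u ∧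
      0 ≤ j ∧ j < (ps.length : Int) ∧ pvConnected (pvGetSet ps u) (pvGetSet ps j) = true := by
  rw [nbrSets_eq_ofList, PySem.Set.mem_ofList]
  simp only [List.mem_flatMap, PySem.List.mem_enumerate_iff]
  constructor
  · rintro ⟨p, ⟨k, hk, rfl⟩, hj⟩
    simp only at hj
    by_cases hku : ((0 : Int) + (k : Int)) = u
    · rw [if_pos hku] at hj
      simp only [pvBigL, List.mem_flatMap, List.mem_filter] at hj
      obtain ⟨a, ha, c, hc, hjo, hne⟩ := hj
      obtain ⟨hj0, hjn, hcj⟩ := (mem_owners ps c j).mp hjo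
      have hu : 0 ≤ u ∧ u < (ps.length : Int) := by omega
      refine ⟨hu, by simpa [← hku] using hne, hj0, hjn, ?_⟩
      rw [pvConnected_iff]
      have hget : pvGetSet ps u = ps[k] := by
        rw [← hku]
        simp [pvGetSet, show ((0:Int) + (k:Int)) = ((k:Nat):Int) by ring, hk]
      exact ⟨a, by rwa [hget], c, by simpa [pvCorners4, corner_neighbors] using hc, hcj⟩
    · rw [if_neg hku] at hj
      simp at hj
  · rintro ⟨⟨hu0, hun⟩, hne, hj0, hjn, hconn⟩
    obtain ⟨k, rfl⟩ : ∃ k : Nat, u = (k : Int) := ⟨u.toNat, by omega⟩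
    have hk : k < ps.length := by exact_mod_cast hun
    refine ⟨((0 : Int) + (k : Int), ps[k]), ⟨k, hk, rfl⟩, ?_⟩
    rw [if_pos (by ring)]
    obtain ⟨a, ha, c, hc, hcj⟩ := (pvConnected_iff _ _).mp hconn
    have hget : pvGetSet ps (k : Int) = ps[k] := by
      simp [pvGetSet, hk]
    simp only [pvBigL, List.mem_flatMap, List.mem_filter]
    refine ⟨a, by rwa [hget] at ha, c, by simpa [pvCorners4, corner_neighbors] using hc,
      (mem_owners ps c j).mpr ⟨hj0, hjn, hcj⟩, by simpa using hne⟩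

lemma nodup_nbrSets (ps : List (List (Int × Int))) (u : Int) : (pvNbrSets ps u).Nodup := by
  rw [nbrSets_eq_ofList]
  exact PySem.Set.nodup_ofList _

lemma sorted_nbrSets_eq (ps : List (List (Int × Int))) (u : Int) :
    PySem.List.sorted (pvNbrSets ps u) (fun x => x) false = pvAdjA ps u := by
  by_cases hu : 0 ≤ u ∧ u < (ps.length : Int)
  · rw [adjA_in_range ps u hu.1 hu.2]
    apply PySem.List.sorted_eq_of_perm_of_pairwise_lt
    · rw [List.perm_ext_iff_of_nodup ((PySem.List.nodup_pyRange_one _ _).filter _)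
        (nodup_nbrSets ps u)]
      intro j
      rw [mem_nbrSets, List.mem_filter, PySem.List.mem_pyRange_one]
      constructor
      · rintro ⟨⟨hj0, hjn⟩, hb⟩
        simp only [Bool.and_eq_true, decide_eq_true_eq] at hb
        exact ⟨hu, hb.1, hj0, hjn, hb.2⟩
      · rintro ⟨-, hne, hj0, hjn, hc⟩
        exact ⟨⟨hj0, hjn⟩, by simp [hne, hc]⟩
    · exact ((PySem.List.pairwise_lt_pyRange_one _ _).filter _)
  · rw [adjA_out_range ps u hu]
    have hempty : pvNbrSets ps u = [] := by
      rcases List.eq_nil_or_concat (pvNbrSets ps u) with h | ⟨l, x, h⟩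
      · exact h
      · exfalso
        have : x ∈ pvNbrSets ps u := by simp [h]
        exact hu ((mem_nbrSets ps u x).mp this).1
    rw [hempty]
    rfl

-- ===== VERDICT (by name: the statement is the Claim_ definition above) =====
theorem corner_connected_components_spec : Claim_equal_corner_connected_components := by
  intro ps _
  unfold Spec_corner_connected_components corner_connected_components corner_connected_components_alt
  have h : (fun u => PySem.List.sorted (pvNbrSets ps u) (fun x => x) false) = pvAdjA ps := by
    funext u; exact sorted_nbrSets_eq ps u
  rw [h]
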